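-- pv_equiv track=rewrite | github.com/jessicayin66/newslens | backend/app/bias_analyzer.py | get_balanced_articles
-- ===== SOURCE A (Python) =====
-- from typing import Dict, List, Tuple
--
-- def get_balanced_articles(articles: List[Dict], target_balance: Dict[str, int] = None) -> List[Dict]:
--     """
--     Filter articles to provide a balanced perspective.
--
--     Args:
--         articles: List of articles with bias information
--         target_balance: Target distribution (e.g., {'left-leaning': 3, 'neutral': 4, 'right-leaning': 3})
--
--     Returns:
--         Balanced list of articles
--     """
--     if not target_balance:
--         target_balance = {'left-leaning': 3, 'neutral': 4, 'right-leaning': 3}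
--
--     # Group articles by bias category
--     bias_groups = {'left-leaning': [], 'neutral': [], 'right-leaning': []}
--
--     for article in articles:
--         bias_category = article.get('bias_category', 'neutral')
--         if bias_category in bias_groups:
--             bias_groups[bias_category].append(article)
--
--     # Select articles to meet target balance
--     balanced_articles = []
--     for category, target_count in target_balance.items():
--         available_articles = bias_groups.get(category, [])
--         selected = available_articles[:target_count]
--         balanced_articles.extend(selected)
--
--     return balanced_articles
-- ===== SOURCE B (Python) =====
-- def get_balanced_articles(articles, target_balance=None):
--     if not target_balance:
--         target_balance = {'left-leaning': 3, 'neutral': 4, 'right-leaning': 3}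
--     balanced = []
--     for category, target_count in target_balance.items():
--         if category in ('left-leaning', 'neutral', 'right-leaning'):
--             balanced += [a for a in articles
--                          if a.get('bias_category', 'neutral') == category][:target_count]
--     return balanced
-- ===== Notes on version B (the rewrite author's own statement) =====
-- stated objective: simpler
-- what changed: B drops A's pre-built bias-group dict entirely: for each (category, target_count) in the target it filters the articles list for that category (restricted to the three known categories) and slices the matches, instead of one grouping pass plus per-category dict lookups.
import Mathlib
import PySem

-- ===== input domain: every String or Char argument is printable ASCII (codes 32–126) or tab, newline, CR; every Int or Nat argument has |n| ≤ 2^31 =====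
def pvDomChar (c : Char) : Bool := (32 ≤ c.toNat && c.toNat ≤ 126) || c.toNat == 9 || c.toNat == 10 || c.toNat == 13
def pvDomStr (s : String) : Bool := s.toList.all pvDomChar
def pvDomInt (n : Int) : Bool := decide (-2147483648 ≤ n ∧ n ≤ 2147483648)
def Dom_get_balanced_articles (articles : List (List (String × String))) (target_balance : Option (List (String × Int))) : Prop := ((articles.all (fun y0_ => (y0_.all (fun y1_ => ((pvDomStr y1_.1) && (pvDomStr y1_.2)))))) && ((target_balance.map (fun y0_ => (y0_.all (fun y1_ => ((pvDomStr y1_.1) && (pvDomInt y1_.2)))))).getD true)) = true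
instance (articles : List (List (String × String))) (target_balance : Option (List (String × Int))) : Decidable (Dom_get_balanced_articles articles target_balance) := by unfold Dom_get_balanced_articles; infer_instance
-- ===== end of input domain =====

-- B replaces A's pre-built bias-group dict by a per-target-category filter-and-slice over the
-- articles list; objective: simpler (shorter, no intermediate grouping structure).

-- Marshalling of a Python dict argument given as an association list (last value wins,
-- first-occurrence position), shared by both ports as input decoding, not algorithm.
def pvDictOf {ν : Type} (l : List (String × ν)) : PySem.Dict String ν :=
  l.foldl (fun d kv => d.insert kv.1 kv.2) PySem.Dict.empty

-- ===== PORT A =====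
def get_balanced_articles (articles : List (List (String × String))) (target_balance : Option (List (String × Int))) : List (List (String × String)) :=
  -- if not target_balance: target_balance = {...}
  let tb : List (String × Int) :=
    match target_balance with
    | none => [("left-leaning", 3), ("neutral", 4), ("right-leaning", 3)]
    | some l => if l.isEmpty then [("left-leaning", 3), ("neutral", 4), ("right-leaning", 3)]
                else (pvDictOf l).items
  -- bias_groups = {'left-leaning': [], 'neutral': [], 'right-leaning': []}; grouping loop
  let bias_groups : PySem.Dict String (List (List (String × String))) :=
    articles.foldl (fun d article =>
      let bias_category := (pvDictOf article).getD "bias_category" "neutral"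
      if d.contains bias_category then d.modify bias_category [] (· ++ [article]) else d)
      (PySem.Dict.ofList [("left-leaning", []), ("neutral", []), ("right-leaning", [])])
  -- selection loop: balanced_articles.extend(bias_groups.get(category, [])[:target_count])
  tb.foldl (fun balanced ct =>
    balanced ++ PySem.List.slice (bias_groups.getD ct.1 []) none (some ct.2)) []

-- ===== PORT B =====
def get_balanced_articles_alt (articles : List (List (String × String))) (target_balance : Option (List (String × Int))) : List (List (String × String)) :=
  let tb : List (String × Int) :=
    match target_balance with
    | none => [("left-leaning", 3), ("neutral", 4), ("right-leaning", 3)]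
    | some l => if l.isEmpty then [("left-leaning", 3), ("neutral", 4), ("right-leaning", 3)]
                else (pvDictOf l).items
  tb.foldl (fun balanced ct =>
    if ct.1 = "left-leaning" ∨ ct.1 = "neutral" ∨ ct.1 = "right-leaning" then
      balanced ++ PySem.List.slice
        (articles.filter (fun a => (pvDictOf a).getD "bias_category" "neutral" == ct.1))
        none (some ct.2)
    else balanced) []

-- ===== PRECONDITION & SPEC =====
def Spec_get_balanced_articles (articles : List (List (String × String))) (target_balance : Option (List (String × Int))) (out : List (List (String × String))) : Prop := out = get_balanced_articles_alt articles target_balance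
instance (articles : List (List (String × String))) (target_balance : Option (List (String × Int))) (out : List (List (String × String))) : Decidable (Spec_get_balanced_articles articles target_balance out) := by unfold Spec_get_balanced_articles; infer_instance

-- ===== CLAIM (what is proved, stated in full; the proofs are below) =====
def Claim_equal_get_balanced_articles : Prop := ∀ (articles : List (List (String × String))) (target_balance : Option (List (String × Int))), Dom_get_balanced_articles articles target_balance → Spec_get_balanced_articles articles target_balance (get_balanced_articles articles target_balance)

-- ===== LEMMAS AND PROOFS =====

-- The grouping step of A, named for the lemmas below.
def pvStepA (d : PySem.Dict String (List (List (String × String)))) (article : List (String × String)) : PySem.Dict String (List (List (String × String))) :=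
  let bias_category := (pvDictOf article).getD "bias_category" "neutral"
  if d.contains bias_category then d.modify bias_category [] (· ++ [article]) else d

lemma pvStepA_keys (d : PySem.Dict String (List (List (String × String)))) (a : List (String × String)) :
    (pvStepA d a).keys = d.keys := by
  by_cases h : d.contains ((pvDictOf a).getD "bias_category" "neutral") = true
  · simp only [pvStepA, h, if_true]
    rw [PySem.Dict.keys_modify, PySem.Dict.keys_insert_of_contains _ _ h]
  · simp [pvStepA, h]

lemma pvFoldA_keys (articles : List (List (String × String))) (d : PySem.Dict String (List (List (String × String)))) :
    (articles.foldl pvStepA d).keys = d.keys := by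
  induction articles generalizing d with
  | nil => rfl
  | cons a rest ih => simpa [List.foldl_cons, pvStepA_keys] using ih (pvStepA d a)

-- Inside the three fixed categories, A's grouping dict holds exactly the filtered articles.
lemma pvFoldA_getD_mem (articles : List (List (String × String)))
    (d : PySem.Dict String (List (List (String × String))))
    (hk : d.keys = ["left-leaning", "neutral", "right-leaning"]) (c : String)
    (hc : c ∈ ["left-leaning", "neutral", "right-leaning"]) :
    (articles.foldl pvStepA d).getD c [] =
      d.getD c [] ++ articles.filter (fun a => (pvDictOf a).getD "bias_category" "neutral" == c) := by
  induction articles generalizing d with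
  | nil => simp
  | cons a rest ih =>
    rw [List.foldl_cons]
    by_cases hmem : (pvDictOf a).getD "bias_category" "neutral" ∈ d.keys
    · have hcont : d.contains ((pvDictOf a).getD "bias_category" "neutral") = true :=
        (PySem.Dict.contains_iff_mem_keys _ _).mpr hmem
      have hstep : pvStepA d a = d.modify ((pvDictOf a).getD "bias_category" "neutral") [] (· ++ [a]) := by
        simp [pvStepA, hcont]
      rw [hstep, ih _ (by rw [PySem.Dict.keys_modify, PySem.Dict.keys_insert_of_contains _ _ hcont, hk]),
          PySem.Dict.getD_modify]
      by_cases hec : c = (pvDictOf a).getD "bias_category" "neutral"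
      · simp [hec, List.append_assoc]
      · have : ((pvDictOf a).getD "bias_category" "neutral" == c) = false := by
          simpa [beq_iff_eq] using fun h => hec h.symm
        simp [hec, this]
    · have hcont : d.contains ((pvDictOf a).getD "bias_category" "neutral") = false := by
        by_contra h
        exact hmem ((PySem.Dict.contains_iff_mem_keys _ _).mp (by simpa using h))
      have hstep : pvStepA d a = d := by simp [pvStepA, hcont]
      have hne : ((pvDictOf a).getD "bias_category" "neutral" == c) = false := by
        simp only [beq_eq_false_iff_ne, ne_eq]
        intro h; exact hmem (h ▸ (hk ▸ hc))
      rw [hstep, ih d hk, List.filter_cons, hne]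
      simp
-- Outside the three fixed categories, A's grouping dict lookup falls back to [].
lemma pvFoldA_getD_not_mem (articles : List (List (String × String)))
    (d : PySem.Dict String (List (List (String × String))))
    (hk : d.keys = ["left-leaning", "neutral", "right-leaning"]) (c : String)
    (hc : c ∉ ["left-leaning", "neutral", "right-leaning"]) :
    (articles.foldl pvStepA d).getD c [] = [] := by
  apply PySem.Dict.getD_of_not_contains
  have : c ∉ (articles.foldl pvStepA d).keys := by
    rw [pvFoldA_keys, hk]; exact hc
  by_contra h
  exact this ((PySem.Dict.contains_iff_mem_keys _ _).mp (by simpa using h))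

theorem get_balanced_articles_spec : Claim_equal_get_balanced_articles := by
  intro articles target_balance _
  unfold Spec_get_balanced_articles get_balanced_articles get_balanced_articles_alt
  have hinit : (PySem.Dict.ofList
      ([("left-leaning", []), ("neutral", []), ("right-leaning", [])] :
        List (String × List (List (String × String))))).keys =
      ["left-leaning", "neutral", "right-leaning"] := by decide
  have hstep : ∀ (balanced : List (List (String × String))) (ct : String × Int),
      balanced ++ PySem.List.slice
        ((articles.foldl pvStepA (PySem.Dict.ofList
          [("left-leaning", []), ("neutral", []), ("right-leaning", [])])).getD ct.1 [])
        none (some ct.2) =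
      (if ct.1 = "left-leaning" ∨ ct.1 = "neutral" ∨ ct.1 = "right-leaning" then
        balanced ++ PySem.List.slice
          (articles.filter (fun a => (pvDictOf a).getD "bias_category" "neutral" == ct.1))
          none (some ct.2)
      else balanced) := by
    intro balanced ct
    by_cases hc : ct.1 ∈ ["left-leaning", "neutral", "right-leaning"]
    · rw [pvFoldA_getD_mem articles _ hinit ct.1 hc]
      have : ct.1 = "left-leaning" ∨ ct.1 = "neutral" ∨ ct.1 = "right-leaning" := by
        simpa using hc
      have hz : (PySem.Dict.ofList
          ([("left-leaning", []), ("neutral", []), ("right-leaning", [])] :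
            List (String × List (List (String × String))))).getD ct.1 [] = [] := by
        rcases this with h | h | h <;> rw [h] <;> decide
      rw [hz]
      simp [this]
    · rw [pvFoldA_getD_not_mem articles _ hinit ct.1 hc]
      have : ¬ (ct.1 = "left-leaning" ∨ ct.1 = "neutral" ∨ ct.1 = "right-leaning") := by
        simpa using hc
      simp [this, PySem.List.slice]
  show List.foldl _ [] _ = List.foldl _ [] _
  congr 1
  funext balanced ct
  exact hstep balanced ct
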